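-- pv_equiv track=rewrite | github.com/jeevesh415/OpenThoughts-Agent | scripts/analysis/sample_early_traces.py | find_first_malformed_message
-- ===== SOURCE A (Python) =====
-- PARSING_ERROR_MARKER = "Previous response had parsing errors"
--
-- def find_first_malformed_message(conversations):
--     """Find the assistant message just before the first parsing error."""
--     if not isinstance(conversations, list):
--         return None, None
--     for i, msg in enumerate(conversations):
--         if isinstance(msg, dict):
--             content = msg.get("content", "")
--             if isinstance(content, str) and PARSING_ERROR_MARKER in content:
--                 for j in range(i - 1, -1, -1):
--                     prev = conversations[j]
--                     if isinstance(prev, dict) and prev.get("role") == "assistant":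
--                         return j, prev.get("content", "")
--                 return i, content
--     return None, None
-- ===== SOURCE B (Python) =====
-- PARSING_ERROR_MARKER = "Previous response had parsing errors"
--
-- def find_first_malformed_message(conversations):
--     """Find the assistant message just before the first parsing error (single forward pass)."""
--     if not isinstance(conversations, list):
--         return None, None
--     last_assistant = None
--     for i, msg in enumerate(conversations):
--         if not isinstance(msg, dict):
--             continue
--         content = msg.get("content", "")
--         if isinstance(content, str) and PARSING_ERROR_MARKER in content:
--             return last_assistant if last_assistant is not None else (i, content)
--         if msg.get("role") == "assistant":
--             last_assistant = (i, content)
--     return None, None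
-- ===== Notes on version B (the rewrite author's own statement) =====
-- stated objective: alternative
-- what changed: Replaces A's nested scan (forward to the first marker message, then a backward rescan of the prefix for the last assistant message) by a single forward pass that maintains the last assistant (index, content) pair seen so far; it trades the backward rescan for a carried accumulator.
import Mathlib
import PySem

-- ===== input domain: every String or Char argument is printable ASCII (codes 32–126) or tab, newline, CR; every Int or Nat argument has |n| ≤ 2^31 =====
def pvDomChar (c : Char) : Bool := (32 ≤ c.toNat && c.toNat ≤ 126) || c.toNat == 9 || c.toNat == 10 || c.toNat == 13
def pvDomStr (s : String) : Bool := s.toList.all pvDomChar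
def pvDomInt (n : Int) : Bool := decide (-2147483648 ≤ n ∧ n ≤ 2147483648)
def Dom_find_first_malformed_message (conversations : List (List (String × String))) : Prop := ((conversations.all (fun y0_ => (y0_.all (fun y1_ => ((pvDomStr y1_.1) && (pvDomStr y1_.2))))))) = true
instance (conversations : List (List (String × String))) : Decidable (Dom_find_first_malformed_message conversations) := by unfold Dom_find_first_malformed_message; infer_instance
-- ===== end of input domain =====

-- B replaces A's backward rescan of the prefix at the first parsing-error message by a single
-- forward pass that maintains the last assistant (index, content) pair seen so far (objective: alternative).
-- Under the type convention 'conversations' is always a list of dicts with string values, so the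
-- Python isinstance guards are always true and are dropped in both ports.

def pvMarker : String := "Previous response had parsing errors"

-- ===== PORT A =====
-- inner loop: for j in range(i-1, -1, -1): prev = conversations[j]; if prev.get("role") == "assistant": return j, prev.get("content", "")
def pvBackA (conversations : List (List (String × String))) : List Int → Option (Int × String)
  | [] => none
  | j :: js =>
    match PySem.List.pyGet? conversations j with
    | none => pvBackA conversations js   -- unreachable: every j produced by the range is in bounds
    | some prev =>
      if (PySem.Dict.mk prev).get? "role" == some "assistant" then
        some (j, (PySem.Dict.mk prev).getD "content" "")
      else pvBackA conversations js

-- outer loop: for i, msg in enumerate(conversations), carried as an index counter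
def pvLoopA (conversations : List (List (String × String))) (i : Int) : List (List (String × String)) → Option Int × Option String
  | [] => (none, none)
  | msg :: rest =>
    let content := (PySem.Dict.mk msg).getD "content" ""
    if PySem.Str.isIn pvMarker content then
      match pvBackA conversations (PySem.List.pyRange (i - 1) (-1) (-1)) with
      | some (j, c) => (some j, some c)
      | none => (some i, some content)
    else pvLoopA conversations (i + 1) rest

def find_first_malformed_message (conversations : List (List (String × String))) : Option Int × Option String :=
  pvLoopA conversations 0 conversations

-- ===== PORT B =====
def pvLoopB (i : Int) (last : Option (Int × String)) : List (List (String × String)) → Option Int × Option String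
  | [] => (none, none)
  | msg :: rest =>
    let content := (PySem.Dict.mk msg).getD "content" ""
    if PySem.Str.isIn pvMarker content then
      match last with
      | some (j, c) => (some j, some c)
      | none => (some i, some content)
    else
      pvLoopB (i + 1)
        (if (PySem.Dict.mk msg).get? "role" == some "assistant" then some (i, content) else last)
        rest

def find_first_malformed_message_alt (conversations : List (List (String × String))) : Option Int × Option String :=
  pvLoopB 0 none conversations

-- ===== PRECONDITION & SPEC =====
def Spec_find_first_malformed_message (conversations : List (List (String × String))) (out : Option Int × Option String) : Prop := out = find_first_malformed_message_alt conversations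
instance (conversations : List (List (String × String))) (out : Option Int × Option String) : Decidable (Spec_find_first_malformed_message conversations out) := by unfold Spec_find_first_malformed_message; infer_instance

-- ===== CLAIM (what is proved, stated in full; the proofs are below) =====
def Claim_equal_find_first_malformed_message : Prop := ∀ (conversations : List (List (String × String))), Dom_find_first_malformed_message conversations → Spec_find_first_malformed_message conversations (find_first_malformed_message conversations)

-- ===== LEMMAS AND PROOFS =====

-- proof-side forward accumulator: the value B's 'last' holds after the first i messages
def pvFwd : List (List (String × String)) → Int → Option (Int × String) → Option (Int × String)
  | [], _, acc => acc
  | m :: t, i, acc =>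
    pvFwd t (i + 1)
      (if (PySem.Dict.mk m).get? "role" == some "assistant" then some (i, (PySem.Dict.mk m).getD "content" "") else acc)

theorem pvFwd_append (p q : List (List (String × String))) (i : Int) (acc : Option (Int × String)) :
    pvFwd (p ++ q) i acc = pvFwd q (i + p.length) (pvFwd p i acc) := by
  induction p generalizing i acc with
  | nil => simp [pvFwd]
  | cons m t ih =>
    simp only [List.cons_append, pvFwd, ih, List.length_cons]
    congr 1
    push_cast
    ring

theorem pvBackA_eq_pvFwd (p rest : List (List (String × String))) :
    pvBackA (p ++ rest) (PySem.List.pyRange ((p.length : Int) - 1) (-1) (-1)) = pvFwd p 0 none := by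
  induction p using List.reverseRecOn generalizing rest with
  | nil => simp [PySem.List.pyRange_neg_one_eq_nil, pvBackA, pvFwd]
  | append_singleton p m ih =>
    have hcons : PySem.List.pyRange (((p ++ [m]).length : Int) - 1) (-1) (-1)
        = (p.length : Int) :: PySem.List.pyRange ((p.length : Int) - 1) (-1) (-1) := by
      rw [show (((p ++ [m]).length : Int) - 1) = (p.length : Int) by simp]
      exact PySem.List.pyRange_neg_one_cons (by omega)
    have hget : PySem.List.pyGet? (p ++ ([m] ++ rest)) ((p.length : Int)) = some m := by
      rw [PySem.List.pyGet?_natCast]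
      simp
    rw [hcons, List.append_assoc]
    simp only [pvBackA, hget]
    rw [pvFwd_append]
    simp only [List.singleton_append] at hget ⊢
    rw [ih (m :: rest)]
    simp [pvFwd]

theorem pvLoopA_eq_pvLoopB (rest p : List (List (String × String))) :
    pvLoopA (p ++ rest) (p.length : Int) rest = pvLoopB (p.length : Int) (pvFwd p 0 none) rest := by
  induction rest generalizing p with
  | nil => simp [pvLoopA, pvLoopB]
  | cons msg rest' ih =>
    simp only [pvLoopA, pvLoopB]
    rw [pvBackA_eq_pvFwd p (msg :: rest')]
    split
    · rfl
    · have h1 : p ++ msg :: rest' = (p ++ [msg]) ++ rest' := by simp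
      have h2 : ((p.length : Int) + 1) = (((p ++ [msg]).length : Nat) : Int) := by simp
      rw [h1, h2, ih (p ++ [msg])]
      rw [pvFwd_append]
      simp [pvFwd]

-- ===== VERDICT (by name: the statement is the Claim_ definition above) =====
theorem find_first_malformed_message_spec : Claim_equal_find_first_malformed_message := by
  intro conversations _
  unfold Spec_find_first_malformed_message find_first_malformed_message find_first_malformed_message_alt
  have := pvLoopA_eq_pvLoopB conversations []
  simpa using this
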